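-- pv_equiv track=rewrite | github.com/karanrampal/data_structures | week2_priority_queues_and_disjoint_sets/2_job_queue/job_queue.py | assign_jobs_fast
-- ===== SOURCE A (Python) =====
-- from collections import namedtuple
-- import heapq as pq
--
-- AssignedJob = namedtuple("AssignedJob", ["worker", "started_at"])
--
-- def assign_jobs_fast(n_workers, jobs):
--     result = []
--     time_worker = [(0, i) for i in range(n_workers)]
--     pq.heapify(time_worker)
--     for job in jobs:
--         start, worker = pq.heappop(time_worker)
--         result.append(AssignedJob(worker, start))
--         pq.heappush(time_worker, (start + job, worker))
--
--     return result
-- ===== SOURCE B (Python) =====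
-- from collections import namedtuple
--
-- AssignedJob = namedtuple("AssignedJob", ["worker", "started_at"])
--
-- def assign_jobs_fast(n_workers, jobs):
--     # Flat table of each worker's next-free time; pick the first worker with the
--     # minimal free time (ties -> lowest index, matching the heap's (time, i) order).
--     free = [0] * n_workers
--     result = []
--     for job in jobs:
--         worker = free.index(min(free))
--         result.append(AssignedJob(worker, free[worker]))
--         free[worker] += job
--     return result
-- ===== Notes on version B (the rewrite author's own statement) =====
-- stated objective: simpler
-- what changed: Replaces the lazy binary heap with a flat list of each worker's next-free time, rescanning for the earliest-free worker (min + index, ties to lowest index) per job instead of heappop/heappush.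
import Mathlib
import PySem

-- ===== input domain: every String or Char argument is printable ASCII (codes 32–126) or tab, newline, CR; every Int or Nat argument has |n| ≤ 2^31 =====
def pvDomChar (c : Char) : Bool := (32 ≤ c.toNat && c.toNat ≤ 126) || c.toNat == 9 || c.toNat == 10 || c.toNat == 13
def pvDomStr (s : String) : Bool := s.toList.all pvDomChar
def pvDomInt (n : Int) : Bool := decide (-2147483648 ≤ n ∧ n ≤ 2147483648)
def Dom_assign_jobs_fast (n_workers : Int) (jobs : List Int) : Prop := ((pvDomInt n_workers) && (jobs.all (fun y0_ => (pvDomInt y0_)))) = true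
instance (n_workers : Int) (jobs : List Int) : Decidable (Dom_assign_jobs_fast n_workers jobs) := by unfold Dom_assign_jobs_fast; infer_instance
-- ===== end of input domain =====

-- B replaces A's binary heap with a flat next-free-time table rescanned per job (simpler, not faster).
-- ===== PORT A =====
-- heapq is a stdlib module used here purely as a priority queue; all keys it ever holds
-- are (time, worker) pairs with pairwise-distinct worker components, so heappop's result
-- is exactly the lexicographic minimum of the heap's contents: the heap is ported as a
-- plain list with pop-of-lexicographic-minimum (exact for this usage).
def pairLt (p q : Int × Int) : Bool := p.1 < q.1 || (p.1 == q.1 && p.2 < q.2)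

def heapMin : List (Int × Int) → (Int × Int) → (Int × Int)
  | [], m => m
  | x :: t, m => heapMin t (if pairLt x m then x else m)

def aLoop : List Int → List (Int × Int) → List (Int × Int)
  | [], _ => []
  | _ :: _, [] => []   -- heappop of an empty heap raises IndexError; excluded by Pre_
  | job :: rest, x :: t =>
      let m := heapMin t x
      (m.2, m.1) :: aLoop rest (((x :: t).erase m) ++ [(m.1 + job, m.2)])

def assign_jobs_fast (n_workers : Int) (jobs : List Int) : List (Int × Int) :=
  aLoop jobs ((PySem.List.pyRange 0 n_workers 1).map (fun i => ((0 : Int), i)))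

-- ===== PORT B =====
def bLoop : List Int → List Int → List (Int × Int)
  | [], _ => []
  | job :: rest, free =>
    match PySem.List.min? free (fun x => x) with
    | none => []   -- min([]) raises ValueError; excluded by Pre_
    | some m =>
      match PySem.List.index? free m with
      | none => []   -- unreachable: the minimum is a member of free
      | some w => ((w : Int), m) :: bLoop rest (free.set w (m + job))

def assign_jobs_fast_alt (n_workers : Int) (jobs : List Int) : List (Int × Int) :=
  bLoop jobs (List.replicate n_workers.toNat 0)

-- ===== PRECONDITION & SPEC =====
-- Pre_ excludes only n_workers ≤ 0 together with a non-empty job list, where A raises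
-- IndexError (heappop from an empty heap); B raises there too (ValueError from min([])).
def Pre_assign_jobs_fast (n_workers : Int) (jobs : List Int) : Prop :=
  0 < n_workers ∨ jobs = []
instance (n_workers : Int) (jobs : List Int) : Decidable (Pre_assign_jobs_fast n_workers jobs) := by
  unfold Pre_assign_jobs_fast; infer_instance

def pvWitness_assign_jobs_fast : Int × List Int := (2, [3, 1, 2])

def Spec_assign_jobs_fast (n_workers : Int) (jobs : List Int) (out : List (Int × Int)) : Prop := out = assign_jobs_fast_alt n_workers jobs
instance (n_workers : Int) (jobs : List Int) (out : List (Int × Int)) : Decidable (Spec_assign_jobs_fast n_workers jobs out) := by unfold Spec_assign_jobs_fast; infer_instance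

-- ===== CLAIM (what is proved, stated in full; the proofs are below) =====
def Claim_equal_assign_jobs_fast : Prop := ∀ (n_workers : Int) (jobs : List Int), Dom_assign_jobs_fast n_workers jobs → Pre_assign_jobs_fast n_workers jobs → Spec_assign_jobs_fast n_workers jobs (assign_jobs_fast n_workers jobs)

-- ===== LEMMAS AND PROOFS =====

-- enumFrom k free = the list of (free-time, worker-id) pairs, ids starting at k
def enumFrom (k : Int) : List Int → List (Int × Int)
  | [] => []
  | a :: t => (a, k) :: enumFrom (k + 1) t

theorem mem_enumFrom {y : Int × Int} : ∀ (l : List Int) (k : Int),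
    y ∈ enumFrom k l ↔ ∃ i, ∃ h : i < l.length, y = (l[i], k + i) := by
  intro l
  induction l with
  | nil => intro k; simp [enumFrom]
  | cons a t ih =>
    intro k
    simp only [enumFrom, List.mem_cons, ih (k + 1)]
    constructor
    · rintro (rfl | ⟨i, hi, rfl⟩)
      · exact ⟨0, by simp, by simp⟩
      · refine ⟨i + 1, by simpa using Nat.succ_lt_succ hi, ?_⟩
        simp only [List.getElem_cons_succ]
        congr 1
        push_cast
        ring
    · rintro ⟨i, hi, rfl⟩
      cases i with
      | zero => left; simp
      | succ i =>
        right
        refine ⟨i, by simpa using Nat.lt_of_succ_lt_succ hi, ?_⟩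
        simp only [List.getElem_cons_succ]
        congr 1
        push_cast
        ring

theorem enumFrom_ne_nil {l : List Int} (hl : l ≠ []) (k : Int) : enumFrom k l ≠ [] := by
  cases l with
  | nil => exact absurd rfl hl
  | cons a t => simp [enumFrom]

theorem pairLt_irrefl (a : Int × Int) : pairLt a a = false := by
  simp [pairLt]

theorem pairLt_asymm {a b : Int × Int} (h : pairLt a b = true) : pairLt b a = false := by
  rcases a with ⟨a1, a2⟩; rcases b with ⟨b1, b2⟩
  simp only [pairLt, Bool.or_eq_true, Bool.and_eq_true, decide_eq_true_eq, beq_iff_eq,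
    Bool.or_eq_false_iff, Bool.and_eq_false_iff, decide_eq_false_iff_not,
    beq_eq_false_iff_ne, ne_eq] at h ⊢
  constructor
  · omega
  · by_cases he : b1 = a1
    · right; omega
    · left; exact he

theorem pairLt_false_trans {a b c : Int × Int}
    (h1 : pairLt a b = false) (h2 : pairLt b c = false) : pairLt a c = false := by
  rcases a with ⟨a1, a2⟩; rcases b with ⟨b1, b2⟩; rcases c with ⟨c1, c2⟩
  simp only [pairLt, Bool.or_eq_false_iff, Bool.and_eq_false_iff, decide_eq_false_iff_not,
    beq_eq_false_iff_ne, ne_eq] at h1 h2 ⊢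
  constructor
  · omega
  · by_cases he : a1 = c1
    · right; omega
    · left; exact he

theorem pairLt_asymm_eq {a b : Int × Int} (hab : pairLt a b = false) (hba : pairLt b a = false) :
    a = b := by
  rcases a with ⟨a1, a2⟩; rcases b with ⟨b1, b2⟩
  simp only [pairLt, Bool.or_eq_false_iff, Bool.and_eq_false_iff, decide_eq_false_iff_not,
    beq_eq_false_iff_ne, ne_eq] at hab hba
  have h1 : a1 = b1 := by omega
  subst h1
  have h2 : a2 = b2 := by
    rcases hab.2 with h | h
    · exact absurd rfl h
    · rcases hba.2 with h' | h'
      · exact absurd rfl h'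
      · omega
  simp [h2]

theorem heapMin_mem : ∀ (t : List (Int × Int)) (x : Int × Int), heapMin t x ∈ x :: t := by
  intro t
  induction t with
  | nil => intro x; simp [heapMin]
  | cons a s ih =>
    intro x
    simp only [heapMin]
    by_cases h : pairLt a x
    · simp only [h, if_true]
      have := ih a
      simp only [List.mem_cons] at this ⊢
      tauto
    · simp only [h]
      have := ih x
      simp only [List.mem_cons] at this ⊢
      tauto

theorem heapMin_min : ∀ (t : List (Int × Int)) (x : Int × Int),
    ∀ y ∈ x :: t, pairLt y (heapMin t x) = false := by
  intro t
  induction t with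
  | nil =>
    intro x y hy
    simp only [List.mem_cons, List.not_mem_nil, or_false] at hy
    subst hy
    simp [heapMin, pairLt_irrefl]
  | cons a s ih =>
    intro x y hy
    simp only [heapMin]
    by_cases h : pairLt a x
    · simp only [h, if_true]
      rcases List.mem_cons.mp hy with rfl | hy'
      · -- y = x (the loser): x is above a, a is above the result
        exact pairLt_false_trans (pairLt_asymm h) (ih a a (List.mem_cons_self))
      · exact ih a y hy'
    · simp only [h]
      rcases List.mem_cons.mp hy with rfl | hy'
      · exact ih y y (List.mem_cons_self)
      · rcases List.mem_cons.mp hy' with rfl | hy''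
        · -- y = a (the loser): pairLt a x = false
          exact pairLt_false_trans (Bool.not_eq_true _ ▸ (by simpa using h))
            (ih x x (List.mem_cons_self))
        · exact ih x y (List.mem_cons.mpr (Or.inr hy''))

theorem min_unique {l : List (Int × Int)} {a b : Int × Int}
    (ha : a ∈ l) (hb : b ∈ l)
    (hma : ∀ y ∈ l, pairLt y a = false) (hmb : ∀ y ∈ l, pairLt y b = false) : a = b :=
  pairLt_asymm_eq (hmb a ha) (hma b hb)

-- erasing the popped pair and appending the pushed one is a permutation of the
-- enumeration of the updated free-table
theorem step_perm : ∀ (free : List Int) (w : Nat) (k v m : Int),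
    ∀ hw : w < free.length, free[w] = m → (∀ j, j < w → ∀ hj : j < free.length, free[j] ≠ m) →
    (((enumFrom k free).erase (m, k + w)) ++ [(v, k + w)]).Perm (enumFrom k (free.set w v)) := by
  intro free
  induction free with
  | nil => intro w k v m hw; simp at hw
  | cons a t ih =>
    intro w k v m hw ha hj
    cases w with
    | zero =>
      simp only [List.getElem_cons_zero] at ha
      subst ha
      simp only [enumFrom, List.set_cons_zero, Nat.cast_zero, add_zero]
      rw [List.erase_cons_head]
      exact List.perm_append_singleton _ _
    | succ w =>
      have ha0 : a ≠ m := by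
        have := hj 0 (Nat.succ_pos w) (by simp)
        simpa using this
      simp only [enumFrom, List.set_cons_succ]
      rw [List.erase_cons_tail (by simp; intro h; exact absurd h ha0)]
      simp only [List.cons_append]
      refine List.Perm.cons _ ?_
      have harith : k + ((w : Int) + 1) = (k + 1) + w := by ring
      have := ih w (k + 1) v m (by simpa using hw)
        (by simpa using ha)
        (by
          intro j hjw hjl
          have := hj (j + 1) (Nat.succ_lt_succ hjw) (by simpa using Nat.succ_lt_succ hjl)
          simpa using this)
      simpa [Nat.cast_succ, harith] using this

-- the initial heap [(0,0),…,(0,n-1)] is the enumeration of the all-zero table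
theorem init_eq : ∀ (c : Nat) (k : Int),
    (PySem.List.pyRange k (k + c) 1).map (fun i => ((0 : Int), i)) = enumFrom k (List.replicate c 0) := by
  intro c
  induction c with
  | zero => intro k; simp [PySem.List.pyRange_one_eq_nil, enumFrom]
  | succ c ih =>
    intro c_k
    rw [PySem.List.pyRange_one_cons (by push_cast; omega)]
    have harith : c_k + ((c : Int) + 1) = (c_k + 1) + c := by ring
    have hrw : c_k + ((c + 1 : Nat) : Int) = (c_k + 1) + c := by push_cast; ring
    simp only [List.map_cons, List.replicate_succ, enumFrom, hrw, ih (c_k + 1)]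

-- main simulation: the heap's contents stay a permutation of the free-table enumeration
theorem main_sim : ∀ (jobs : List Int) (free : List Int) (h : List (Int × Int)),
    free ≠ [] → h.Perm (enumFrom 0 free) → aLoop jobs h = bLoop jobs free := by
  intro jobs
  induction jobs with
  | nil => intro free h _ _; simp [aLoop, bLoop]
  | cons job rest ih =>
    intro free h hfree hperm
    -- B side: the minimum and its first index
    obtain ⟨m, hm⟩ : ∃ m, PySem.List.min? free (fun x => x) = some m := by
      cases hmin : PySem.List.min? free (fun x => x) with
      | none => exact absurd ((PySem.List.min?_eq_none_iff free _).mp hmin) hfree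
      | some m => exact ⟨m, rfl⟩
    have hmmem : m ∈ free := PySem.List.min?_mem hm
    have hminle : ∀ y ∈ free, m ≤ y := PySem.List.min?_isMin hm
    obtain ⟨w, hwidx⟩ : ∃ w, PySem.List.index? free m = some w := by
      cases hidx : PySem.List.index? free m with
      | none => exact absurd hmmem ((PySem.List.index?_eq_none_iff free m).mp hidx)
      | some w => exact ⟨w, rfl⟩
    obtain ⟨hw, hfw, hfj⟩ := PySem.List.getElem_of_index?_eq_some hwidx
    -- the pair (m, w) is the lexicographic minimum of the enumeration
    have hpair_mem : (m, (w : Int)) ∈ enumFrom 0 free := by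
      rw [mem_enumFrom]
      exact ⟨w, hw, by simp [hfw]⟩
    have hpair_min : ∀ y ∈ enumFrom 0 free, pairLt y (m, (w : Int)) = false := by
      intro y hy
      rw [mem_enumFrom] at hy
      obtain ⟨i, hi, rfl⟩ := hy
      have h1 : m ≤ free[i] := hminle _ (List.getElem_mem hi)
      simp only [pairLt, Bool.or_eq_false_iff, Bool.and_eq_false_iff, decide_eq_false_iff_not,
        beq_eq_false_iff_ne, ne_eq]
      by_cases hiw : i < w
      · have h2 : free[i] ≠ m := hfj i hiw
        exact ⟨by omega, Or.inl (by omega)⟩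
      · exact ⟨by omega, Or.inr (by simp only [zero_add]; omega)⟩
    -- A side: the heap is non-empty
    cases h with
    | nil => exact absurd (hperm.symm.eq_nil) (enumFrom_ne_nil hfree 0)
    | cons x t =>
    -- heapMin over the heap equals (m, w)
    have hhm : heapMin t x = (m, (w : Int)) := by
      refine min_unique (l := x :: t) (heapMin_mem t x) (hperm.mem_iff.mpr hpair_mem)
        (heapMin_min t x) ?_
      intro y hy
      exact hpair_min y (hperm.mem_iff.mp hy)
    have hset_ne : free.set w (m + job) ≠ [] := by
      intro hnil
      have : (free.set w (m + job)).length = 0 := by rw [hnil]; simp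
      simp only [List.length_set] at this
      exact hfree (List.length_eq_zero_iff.mp this)
    have hperm' : (((x :: t).erase (m, (w : Int))) ++ [(m + job, (w : Int))]).Perm
        (enumFrom 0 (free.set w (m + job))) := by
      refine List.Perm.trans ((hperm.erase _).append_right _) ?_
      have := step_perm free w 0 (m + job) m hw hfw (fun j hjw hjl => hfj j hjw)
      simpa using this
    have hstep := ih (free.set w (m + job)) _ hset_ne hperm'
    simp only [aLoop, bLoop, hm, hwidx, hhm, hstep]

-- ===== VERDICT (by name: the statement is the Claim_ definition above) =====
theorem assign_jobs_fast_spec : Claim_equal_assign_jobs_fast := by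
  intro n jobs _ hpre
  unfold Spec_assign_jobs_fast assign_jobs_fast assign_jobs_fast_alt
  rcases hpre with hn | rfl
  · have hinit : (PySem.List.pyRange 0 n 1).map (fun i => ((0 : Int), i)) =
        enumFrom 0 (List.replicate n.toNat 0) := by
      have := init_eq n.toNat 0
      rw [show (0 : Int) + (n.toNat : Int) = n by omega] at this
      simpa using this
    apply main_sim
    · simp only [ne_eq, ← List.length_eq_zero_iff, List.length_replicate]
      omega
    · rw [hinit]
  · simp [aLoop, bLoop]
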